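-- pv_equiv track=rewrite | github.com/sproutsai-engg/coding_question_generator | json_files/python_codes/Q_694.py | numDistinctIslands
-- ===== SOURCE A (Python) =====
-- def numDistinctIslands(grid):
--     unique_islands = set()
--     for i in range(len(grid)):
--         for j in range(len(grid[0])):
--             if grid[i][j] == 1:
--                 island_shape = []
--                 dfs(grid, i, j, i, j, island_shape)
--                 island_shape.sort()
--                 unique_islands.add(tuple(island_shape))
--     return len(unique_islands)
--
-- def dfs(grid, i, j, i0, j0, shape):
--     if 0 <= i < len(grid) and 0 <= j < len(grid[0]) and grid[i][j] == 1:
--         grid[i][j] = 2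
--         shape.append((i - i0, j - j0))
--         dfs(grid, i - 1, j, i0, j0, shape)
--         dfs(grid, i + 1, j, i0, j0, shape)
--         dfs(grid, i, j - 1, i0, j0, shape)
--         dfs(grid, i, j + 1, i0, j0, shape)
-- ===== SOURCE B (Python) =====
-- def numDistinctIslands(grid):
--     # Iterative flood-fill with an explicit stack instead of recursive DFS.
--     # Note: like the original, this marks visited cells to 2 in place.
--     unique_islands = set()
--     for i in range(len(grid)):
--         for j in range(len(grid[0])):
--             if grid[i][j] == 1:
--                 shape = []
--                 stack = [(i, j)]
--                 while stack:
--                     r, c = stack.pop()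
--                     if 0 <= r < len(grid) and 0 <= c < len(grid[0]) and grid[r][c] == 1:
--                         grid[r][c] = 2
--                         shape.append((r - i, c - j))
--                         stack.extend([(r, c + 1), (r, c - 1), (r + 1, c), (r - 1, c)])
--                 shape.sort()
--                 unique_islands.add(tuple(shape))
--     return len(unique_islands)
-- ===== Notes on version B (the rewrite author's own statement) =====
-- stated objective: alternative
-- what changed: The recursive four-way DFS helper is replaced by an iterative flood fill with an explicit stack inside the same cell scan; no recursion (and no Python recursion-depth limit on large islands).
import Mathlib
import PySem

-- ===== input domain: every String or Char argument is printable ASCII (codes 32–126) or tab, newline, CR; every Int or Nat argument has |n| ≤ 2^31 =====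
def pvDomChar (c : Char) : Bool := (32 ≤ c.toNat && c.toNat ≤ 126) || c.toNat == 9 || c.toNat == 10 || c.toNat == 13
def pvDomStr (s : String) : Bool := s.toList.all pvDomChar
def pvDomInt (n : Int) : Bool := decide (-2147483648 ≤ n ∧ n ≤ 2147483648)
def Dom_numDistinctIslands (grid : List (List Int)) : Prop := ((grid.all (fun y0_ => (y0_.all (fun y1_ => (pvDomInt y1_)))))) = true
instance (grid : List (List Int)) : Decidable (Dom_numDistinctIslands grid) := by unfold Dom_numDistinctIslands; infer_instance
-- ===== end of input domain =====

-- B replaces the recursive DFS helper by an iterative flood fill with an explicit stack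
-- (same double scan, same in-place marking to 2 of the Python grid; equivalence is about the return value).

-- shared grid accessors (exact under Pre_: every index is bounds-checked before access)
def pvRows (g : List (List Int)) : Int := (g.length : Int)
def pvCols (g : List (List Int)) : Int := ((g.headD []).length : Int)
def pvCell (g : List (List Int)) (i j : Int) : Int := (g.getD i.toNat []).getD j.toNat 0
def pvSet2 (g : List (List Int)) (i j : Int) : List (List Int) :=
  g.set i.toNat ((g.getD i.toNat []).set j.toNat 2)
-- number of 1-cells: the termination measure of B's loop (and A's fuel)
def pvOnes (g : List (List Int)) : Nat := (g.map (fun r => r.count 1)).sum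

-- lemmas cited by floodB's decreasing_by (must precede the port)
theorem pvCountSetLt (row : List Int) (j : Nat) (hj : j < row.length) (h1 : row[j] = 1) :
    (row.set j (2:Int)).count 1 < row.count 1 := by
  induction row generalizing j with
  | nil => simp at hj
  | cons a t ih =>
    cases j with
    | zero =>
      simp only [List.getElem_cons_zero] at h1
      subst h1
      simp
    | succ j =>
      simp only [List.set_cons_succ, List.count_cons]
      have := ih j (by simpa using hj) (by simpa using h1)
      omega

theorem pvSumSetLt (l : List Nat) (i a : Nat) (hi : i < l.length) (ha : a < l[i]) :
    (l.set i a).sum < l.sum := by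
  induction l generalizing i with
  | nil => simp at hi
  | cons b t ih =>
    cases i with
    | zero =>
      simp only [List.getElem_cons_zero] at ha
      simp only [List.set_cons_zero, List.sum_cons]
      omega
    | succ i =>
      simp only [List.set_cons_succ, List.sum_cons]
      have := ih i (by simpa using hi) (by simpa using ha)
      omega

theorem pvOnes_set2_lt (g : List (List Int)) (i j : Int)
    (hi0 : 0 ≤ i) (hi : i < pvRows g) (hc : pvCell g i j = 1) :
    pvOnes (pvSet2 g i j) < pvOnes g := by
  have hilen : i.toNat < g.length := by
    simp only [pvRows] at hi; omega
  have hrow : g.getD i.toNat [] = g[i.toNat] := List.getD_eq_getElem g [] hilen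
  have hjlen : j.toNat < g[i.toNat].length := by
    by_contra hle
    simp only [pvCell, hrow] at hc
    rw [List.getD_eq_default] at hc
    · exact absurd hc (by norm_num)
    · omega
  have hc1 : g[i.toNat][j.toNat] = 1 := by
    simpa only [pvCell, hrow, List.getD_eq_getElem _ _ hjlen] using hc
  simp only [pvOnes, pvSet2, hrow, List.map_set]
  refine pvSumSetLt _ i.toNat _ (by simpa using hilen) ?_
  have := pvCountSetLt g[i.toNat] j.toNat hjlen hc1
  simpa using this

-- ===== PORT A =====
-- A's recursive dfs; the fuel argument only makes it total in Lean: each nesting level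
-- marks a 1-cell, so fuel = pvOnes g + 1 at the call site is never exhausted.
def dfsA : Nat → List (List Int) → Int → Int → Int → Int → List (Int × Int) →
    (List (List Int)) × List (Int × Int)
  | 0, g, _, _, _, _, s => (g, s)
  | fuel+1, g, i, j, i0, j0, s =>
    if 0 ≤ i ∧ i < pvRows g ∧ 0 ≤ j ∧ j < pvCols g ∧ pvCell g i j = 1 then
      let g1 := pvSet2 g i j
      let s1 := s ++ [(i - i0, j - j0)]
      let r1 := dfsA fuel g1 (i - 1) j i0 j0 s1
      let r2 := dfsA fuel r1.1 (i + 1) j i0 j0 r1.2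
      let r3 := dfsA fuel r2.1 i (j - 1) i0 j0 r2.2
      dfsA fuel r3.1 i (j + 1) i0 j0 r3.2
    else (g, s)

def numDistinctIslands (grid : List (List Int)) : Int :=
  let cols := (grid.headD []).length
  let res := (List.range grid.length).foldl (fun st (i : Nat) =>
      (List.range cols).foldl (fun st (j : Nat) =>
        if pvCell st.1 (i : Int) (j : Int) = 1 then
          let r := dfsA (pvOnes st.1 + 1) st.1 (i : Int) (j : Int) (i : Int) (j : Int) []
          (r.1, PySem.Set.add st.2 (PySem.List.sorted2 r.2 (fun p => p.1) (fun p => p.2)))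
        else st) st)
    (grid, (PySem.Set.empty : PySem.Set (List (Int × Int))))
  (PySem.Set.len res.2 : Int)

-- ===== PORT B =====
-- B's iterative flood fill: stack head = top of the Python list (pop/extend at the end)
def floodB : List (List Int) → Int → Int → List (Int × Int) → List (Int × Int) →
    (List (List Int)) × List (Int × Int)
  | g, _, _, [], shape => (g, shape)
  | g, i0, j0, (i, j) :: rest, shape =>
    if h : 0 ≤ i ∧ i < pvRows g ∧ 0 ≤ j ∧ j < pvCols g ∧ pvCell g i j = 1 then
      floodB (pvSet2 g i j) i0 j0
        ((i - 1, j) :: (i + 1, j) :: (i, j - 1) :: (i, j + 1) :: rest)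
        (shape ++ [(i - i0, j - j0)])
    else
      floodB g i0 j0 rest shape
  termination_by g _ _ stack _ => (pvOnes g, stack.length)
  decreasing_by
  · exact Prod.Lex.left _ _ (pvOnes_set2_lt g i j h.1 h.2.1 h.2.2.2.2)
  · exact Prod.Lex.right _ (by simp)

def numDistinctIslands_alt (grid : List (List Int)) : Int :=
  let cols := (grid.headD []).length
  let res := (List.range grid.length).foldl (fun st (i : Nat) =>
      (List.range cols).foldl (fun st (j : Nat) =>
        if pvCell st.1 (i : Int) (j : Int) = 1 then
          let r := floodB st.1 (i : Int) (j : Int) [((i : Int), (j : Int))] []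
          (r.1, PySem.Set.add st.2 (PySem.List.sorted2 r.2 (fun p => p.1) (fun p => p.2)))
        else st) st)
    (grid, (PySem.Set.empty : PySem.Set (List (Int × Int))))
  (PySem.Set.len res.2 : Int)

-- ===== PRECONDITION & SPEC =====
-- Pre_ excludes ragged grids having a row shorter than row 0: there the Python A raises IndexError.
def Pre_numDistinctIslands (grid : List (List Int)) : Prop :=
  ∀ row ∈ grid, (grid.headD []).length ≤ row.length
instance (grid : List (List Int)) : Decidable (Pre_numDistinctIslands grid) := by
  unfold Pre_numDistinctIslands; infer_instance
def pvWitness_numDistinctIslands : List (List Int) := [[1, 1, 0], [0, 0, 1], [1, 0, 1]]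
def Spec_numDistinctIslands (grid : List (List Int)) (out : Int) : Prop := out = numDistinctIslands_alt grid
instance (grid : List (List Int)) (out : Int) : Decidable (Spec_numDistinctIslands grid out) := by unfold Spec_numDistinctIslands; infer_instance

-- ===== CLAIM (what is proved, stated in full; the proofs are below) =====
def Claim_equal_numDistinctIslands : Prop := ∀ (grid : List (List Int)), Dom_numDistinctIslands grid → Pre_numDistinctIslands grid → Spec_numDistinctIslands grid (numDistinctIslands grid)

-- ===== LEMMAS AND PROOFS =====

theorem floodB_nil (g : List (List Int)) (i0 j0 : Int) (shape : List (Int × Int)) :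
    floodB g i0 j0 [] shape = (g, shape) := by
  rw [floodB]

theorem floodB_cons (g : List (List Int)) (i0 j0 i j : Int) (rest shape : List (Int × Int)) :
    floodB g i0 j0 ((i, j) :: rest) shape =
      if 0 ≤ i ∧ i < pvRows g ∧ 0 ≤ j ∧ j < pvCols g ∧ pvCell g i j = 1 then
        floodB (pvSet2 g i j) i0 j0
          ((i - 1, j) :: (i + 1, j) :: (i, j - 1) :: (i, j + 1) :: rest)
          (shape ++ [(i - i0, j - j0)])
      else
        floodB g i0 j0 rest shape := by
  rw [floodB]; split <;> rfl

theorem pvOnes_dfsA_le (fuel : Nat) : ∀ (g : List (List Int)) (i j i0 j0 : Int)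
    (s : List (Int × Int)), pvOnes (dfsA fuel g i j i0 j0 s).1 ≤ pvOnes g := by
  induction fuel with
  | zero => intro g i j i0 j0 s; simp [dfsA]
  | succ fuel ih =>
    intro g i j i0 j0 s
    rw [dfsA]
    split
    · rename_i h
      refine le_trans (ih _ _ _ _ _ _) ?_
      refine le_trans (ih _ _ _ _ _ _) ?_
      refine le_trans (ih _ _ _ _ _ _) ?_
      refine le_trans (ih _ _ _ _ _ _) ?_
      exact le_of_lt (pvOnes_set2_lt g i j h.1 h.2.1 h.2.2.2.2)
    · exact le_refl _

theorem flood_eq_dfs (fuel : Nat) : ∀ (g : List (List Int)) (i j i0 j0 : Int)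
    (s rest : List (Int × Int)), pvOnes g < fuel →
    floodB g i0 j0 ((i, j) :: rest) s =
      floodB (dfsA fuel g i j i0 j0 s).1 i0 j0 rest (dfsA fuel g i j i0 j0 s).2 := by
  induction fuel with
  | zero => intro g i j i0 j0 s rest h; omega
  | succ fuel ih =>
    intro g i j i0 j0 s rest h
    rw [dfsA, floodB_cons]
    split
    · rename_i hv
      have h1 : pvOnes (pvSet2 g i j) < fuel := by
        have := pvOnes_set2_lt g i j hv.1 hv.2.1 hv.2.2.2.2
        omega
      rw [ih _ _ _ _ _ _ _ h1]
      have h2 : pvOnes (dfsA fuel (pvSet2 g i j) (i - 1) j i0 j0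
          (s ++ [(i - i0, j - j0)])).1 < fuel :=
        lt_of_le_of_lt (pvOnes_dfsA_le _ _ _ _ _ _ _) h1
      rw [ih _ _ _ _ _ _ _ h2]
      have h3 : pvOnes (dfsA fuel
          (dfsA fuel (pvSet2 g i j) (i - 1) j i0 j0 (s ++ [(i - i0, j - j0)])).1 (i + 1) j i0 j0
          (dfsA fuel (pvSet2 g i j) (i - 1) j i0 j0 (s ++ [(i - i0, j - j0)])).2).1 < fuel :=
        lt_of_le_of_lt (pvOnes_dfsA_le _ _ _ _ _ _ _) h2
      rw [ih _ _ _ _ _ _ _ h3]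
      have h4 : pvOnes (dfsA fuel
          (dfsA fuel (dfsA fuel (pvSet2 g i j) (i - 1) j i0 j0 (s ++ [(i - i0, j - j0)])).1
            (i + 1) j i0 j0
            (dfsA fuel (pvSet2 g i j) (i - 1) j i0 j0 (s ++ [(i - i0, j - j0)])).2).1 i (j - 1)
          i0 j0
          (dfsA fuel (dfsA fuel (pvSet2 g i j) (i - 1) j i0 j0 (s ++ [(i - i0, j - j0)])).1
            (i + 1) j i0 j0
            (dfsA fuel (pvSet2 g i j) (i - 1) j i0 j0 (s ++ [(i - i0, j - j0)])).2).2).1 < fuel :=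
        lt_of_le_of_lt (pvOnes_dfsA_le _ _ _ _ _ _ _) h3
      rw [ih _ _ _ _ _ _ _ h4]
    · rfl

-- per start cell: the stack flood fill produces exactly A's dfs result
theorem flood_cell_eq (g : List (List Int)) (i j : Int) :
    floodB g i j [(i, j)] [] = dfsA (pvOnes g + 1) g i j i j [] := by
  rw [flood_eq_dfs (pvOnes g + 1) g i j i j [] [] (by omega), floodB_nil]

theorem ports_eq (grid : List (List Int)) :
    numDistinctIslands grid = numDistinctIslands_alt grid := by
  unfold numDistinctIslands numDistinctIslands_alt
  simp only [flood_cell_eq]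

-- ===== VERDICT (by name: the statement is the Claim_ definition above) =====
theorem numDistinctIslands_spec : Claim_equal_numDistinctIslands := by
  intro grid _ _
  unfold Spec_numDistinctIslands
  exact ports_eq grid
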